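-- pv_equiv track=rewrite | github.com/Terence-wilson/Random_projects | funkle.py | tally_dub_quad
-- ===== SOURCE A (Python) =====
-- def tally_dub_quad(bois):
--     check = True
--     numbers = bois.keys()
--     too = 2
--     form = 4
--     if len(bois) == 2:
--         for num in numbers:
--             if bois[num] != too:
--                 if bois[num] != form:
--                     check = False
--                     break
--                 else:
--                     form = 2
--             else: too = 4
--     else:
--         check = False
--     return check
-- ===== SOURCE B (Python) =====
-- def tally_dub_quad(bois):
--     if len(bois) != 2:
--         return False
--     twos = sum(1 for v in bois.values() if v == 2)
--     fours = sum(1 for v in bois.values() if v == 4)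
--     return twos == 1 and fours == 1
-- ===== Notes on version B (the rewrite author's own statement) =====
-- stated objective: simpler
-- what changed: Replaces A's stateful toggle loop (mutating the sentinels too/form while scanning keys and indexing back into the dict) by a guard on len plus two value counts: result is exactly 'one value equals 2 and one equals 4'.
import Mathlib
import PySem

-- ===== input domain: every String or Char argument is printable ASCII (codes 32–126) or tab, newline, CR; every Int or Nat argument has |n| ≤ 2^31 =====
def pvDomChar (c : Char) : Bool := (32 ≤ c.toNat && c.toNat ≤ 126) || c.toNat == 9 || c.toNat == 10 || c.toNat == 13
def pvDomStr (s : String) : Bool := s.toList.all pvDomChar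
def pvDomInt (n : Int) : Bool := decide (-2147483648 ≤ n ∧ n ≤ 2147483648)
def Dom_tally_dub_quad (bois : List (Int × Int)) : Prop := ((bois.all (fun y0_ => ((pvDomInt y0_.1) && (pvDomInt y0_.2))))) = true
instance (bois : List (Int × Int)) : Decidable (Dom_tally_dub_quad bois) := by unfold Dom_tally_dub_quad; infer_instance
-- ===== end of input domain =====

-- B replaces A's stateful sentinel-toggling loop by a length guard plus two value counts (objective: simpler).

-- ===== PORT A =====
-- A's for-loop over the keys, carrying the mutable sentinels `too` and `form`;
-- `break` with check = False becomes returning false.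
def tallyLoopA (d : PySem.Dict Int Int) (too form : Int) : List Int → Bool
  | [] => true
  | k :: ks =>
    -- bois[num]: the key comes from the dict itself, so the lookup always succeeds
    let v := (d.get? k).getD 0
    if v ≠ too then
      if v ≠ form then false
      else tallyLoopA d too 2 ks
    else tallyLoopA d 4 form ks

def tally_dub_quad (bois : List (Int × Int)) : Bool :=
  let d := PySem.Dict.mk bois
  if bois.length = 2 then tallyLoopA d 2 4 d.keys else false

-- ===== PORT B =====
def tally_dub_quad_alt (bois : List (Int × Int)) : Bool :=
  if bois.length ≠ 2 then false
  else
    let twos := PySem.List.count (bois.map Prod.snd) 2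
    let fours := PySem.List.count (bois.map Prod.snd) 4
    twos == 1 && fours == 1

-- ===== PRECONDITION & SPEC =====
-- Pre_ states the dict invariant: the association list has pairwise-distinct keys
-- (every Python dict satisfies it; it excludes no input the Python A accepts).
def Pre_tally_dub_quad (bois : List (Int × Int)) : Prop := (bois.map Prod.fst).Nodup
instance (bois : List (Int × Int)) : Decidable (Pre_tally_dub_quad bois) := by unfold Pre_tally_dub_quad; infer_instance
def pvWitness_tally_dub_quad : (List (Int × Int)) := [(0, 2), (1, 4)]

def Spec_tally_dub_quad (bois : List (Int × Int)) (out : Bool) : Prop := out = tally_dub_quad_alt bois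
instance (bois : List (Int × Int)) (out : Bool) : Decidable (Spec_tally_dub_quad bois out) := by unfold Spec_tally_dub_quad; infer_instance

-- ===== CLAIM (what is proved, stated in full; the proofs are below) =====
def Claim_equal_tally_dub_quad : Prop := ∀ (bois : List (Int × Int)), Dom_tally_dub_quad bois → Pre_tally_dub_quad bois → Spec_tally_dub_quad bois (tally_dub_quad bois)

-- ===== LEMMAS AND PROOFS =====

-- ===== VERDICT (by name: the statement is the Claim_ definition above) =====
theorem tally_dub_quad_spec : Claim_equal_tally_dub_quad := by
  intro bois _ hpre
  unfold Spec_tally_dub_quad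
  match bois with
  | [] => decide
  | [_] => simp [tally_dub_quad, tally_dub_quad_alt]
  | [(k1, v1), (k2, v2)] =>
    have hk : k1 ≠ k2 := by
      simp [Pre_tally_dub_quad] at hpre; exact hpre
    simp [tally_dub_quad, tally_dub_quad_alt, tallyLoopA, PySem.Dict.get?_mk_cons,
      PySem.List.count, hk, PySem.Dict.keys]
    by_cases h1 : v1 = 2 <;> by_cases h2 : v1 = 4 <;>
      by_cases h3 : v2 = 2 <;> by_cases h4 : v2 = 4 <;>
      simp_all
  | _ :: _ :: _ :: _ => simp [tally_dub_quad, tally_dub_quad_alt]
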